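-- pv_equiv track=rewrite | github.com/Joseph-Chou911/fred-cache | scripts/build_tw0050_bb_report.py | _dq_compact
-- ===== SOURCE A (Python) =====
-- from typing import Any, Dict, List, Optional, Tuple
--
-- def _dq_compact(dq_flags: List[str]) -> str:
--     if not dq_flags:
--         return "(none)"
--     priority_prefix = (
--         "PRICE_",
--         "FWD_MDD_",
--         "TWSE_",
--         "YF_",
--         "RAW_",
--         "CHIP_",
--         "MARGIN_",
--         "PLEDGE_",
--     )
--     pri = [f for f in dq_flags if any(f.startswith(p) for p in priority_prefix)]
--     rest = [f for f in dq_flags if f not in pri]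
--     ordered = pri + rest
--     cap = 6
--     if len(ordered) <= cap:
--         return ", ".join(ordered)
--     return ", ".join(ordered[:cap]) + f", ... (+{len(ordered) - cap})"
-- ===== SOURCE B (Python) =====
-- from typing import List
--
--
-- def _dq_compact(dq_flags: List[str]) -> str:
--     if not dq_flags:
--         return "(none)"
--     priority_prefix = (
--         "PRICE_",
--         "FWD_MDD_",
--         "TWSE_",
--         "YF_",
--         "RAW_",
--         "CHIP_",
--         "MARGIN_",
--         "PLEDGE_",
--     )
--     # one stable sort: priority flags (key 0) first, others (key 1) after,
--     # each group keeping its original relative order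
--     ordered = sorted(dq_flags, key=lambda f: 0 if f.startswith(priority_prefix) else 1)
--     cap = 6
--     body = ", ".join(ordered[:cap])
--     extra = len(ordered) - cap
--     return body if extra <= 0 else body + f", ... (+{extra})"
-- ===== Notes on version B (the rewrite author's own statement) =====
-- stated objective: idiomatic
-- what changed: Replaces the two filtering passes (priority list, then a 'not in pri' membership rescan) and concatenation with a single stable sort keyed 0/1 on startswith(prefix-tuple), and computes the capped body/overflow suffix from one slice.
import Mathlib
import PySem

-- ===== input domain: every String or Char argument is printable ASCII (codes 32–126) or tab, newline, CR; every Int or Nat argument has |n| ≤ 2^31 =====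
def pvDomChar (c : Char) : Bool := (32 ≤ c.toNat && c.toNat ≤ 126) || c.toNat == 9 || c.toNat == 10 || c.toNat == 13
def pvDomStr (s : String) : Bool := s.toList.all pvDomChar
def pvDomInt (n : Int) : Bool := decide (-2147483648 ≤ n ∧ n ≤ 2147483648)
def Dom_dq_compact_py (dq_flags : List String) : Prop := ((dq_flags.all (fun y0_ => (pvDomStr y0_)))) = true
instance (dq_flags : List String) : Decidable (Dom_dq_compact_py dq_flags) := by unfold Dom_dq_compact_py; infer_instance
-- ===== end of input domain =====

-- B replaces A's two filtering passes + concatenation with one stable 0/1-keyed sort (idiomatic).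

-- the priority_prefix tuple, literal in both Pythons
def pvPriorityPrefix : List String :=
  ["PRICE_", "FWD_MDD_", "TWSE_", "YF_", "RAW_", "CHIP_", "MARGIN_", "PLEDGE_"]

-- ===== PORT A =====
def dq_compact_py (dq_flags : List String) : String :=
  if dq_flags = [] then "(none)"
  else
    -- pri = [f for f in dq_flags if any(f.startswith(p) for p in priority_prefix)]
    let pri := dq_flags.filter (fun f => pvPriorityPrefix.any (fun p => PySem.Str.startswith f p))
    -- rest = [f for f in dq_flags if f not in pri]
    let rest := dq_flags.filter (fun f => !(pri.contains f))
    let ordered := pri ++ rest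
    if ordered.length ≤ 6 then PySem.Str.join ", " ordered
    else
      PySem.Str.join ", " (PySem.List.slice ordered none (some 6)) ++
        (", ... (+" ++ PySem.Int.toStr ((ordered.length : Int) - 6) ++ ")")

-- ===== PORT B =====
def dq_compact_py_alt (dq_flags : List String) : String :=
  if dq_flags = [] then "(none)"
  else
    -- ordered = sorted(dq_flags, key=lambda f: 0 if f.startswith(priority_prefix) else 1)
    let ordered := PySem.List.sorted dq_flags
      (fun f => if pvPriorityPrefix.any (fun p => PySem.Str.startswith f p) then (0 : Nat) else 1)
    let body := PySem.Str.join ", " (PySem.List.slice ordered none (some 6))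
    let extra : Int := (ordered.length : Int) - 6
    if extra ≤ 0 then body
    else body ++ (", ... (+" ++ PySem.Int.toStr extra ++ ")")

-- ===== PRECONDITION & SPEC =====
def Spec_dq_compact_py (dq_flags : List String) (out : String) : Prop := out = dq_compact_py_alt dq_flags
instance (dq_flags : List String) (out : String) : Decidable (Spec_dq_compact_py dq_flags out) := by unfold Spec_dq_compact_py; infer_instance

-- ===== CLAIM (what is proved, stated in full; the proofs are below) =====
def Claim_equal_dq_compact_py : Prop := ∀ (dq_flags : List String), Dom_dq_compact_py dq_flags → Spec_dq_compact_py dq_flags (dq_compact_py dq_flags)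

-- ===== LEMMAS AND PROOFS =====

-- inserting past a block of elements it does not go before
theorem insertBy_append_left {α : Type} (before : α → α → Bool) (x : α) (A l : List α)
    (h : ∀ a ∈ A, before x a = false) :
    PySem.List.insertBy before x (A ++ l) = A ++ PySem.List.insertBy before x l := by
  induction A with
  | nil => simp
  | cons a A ih =>
    have ha : before x a = false := h a (by simp)
    simp [PySem.List.insertBy, ha, ih (fun b hb => h b (by simp [hb]))]

-- a stable insertion sort with a two-valued key is exactly partition: filter p ++ filter ¬p
theorem foldl_insertBy_two_valued (p : String → Bool) :
    ∀ (xs A B : List String), (∀ a ∈ A, p a = true) → (∀ b ∈ B, p b = false) →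
    xs.foldl (fun acc x =>
        PySem.List.insertBy
          (fun a b => decide ((if p a then (0 : Nat) else 1) < (if p b then (0 : Nat) else 1)))
          x acc) (A ++ B)
      = (A ++ xs.filter p) ++ (B ++ xs.filter (fun f => !p f)) := by
  intro xs
  induction xs with
  | nil => intro A B _ _; simp
  | cons x xs ih =>
    intro A B hA hB
    by_cases hx : p x = true
    · have hstep : PySem.List.insertBy
          (fun a b => decide ((if p a then (0 : Nat) else 1) < (if p b then (0 : Nat) else 1)))
          x (A ++ B) = (A ++ [x]) ++ B := by
        rw [insertBy_append_left _ _ A B (fun a ha => by simp [hx, hA a ha])]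
        cases B with
        | nil => simp [PySem.List.insertBy]
        | cons b B' => simp [PySem.List.insertBy, hx, hB b (by simp)]
      have := ih (A ++ [x]) B (by intro a ha; rcases List.mem_append.1 ha with h | h
                                  · exact hA a h
                                  · simp at h; simpa [h] using hx) hB
      simp only [List.foldl_cons, hstep, this, List.filter_cons, hx]
      simp
    · have hx' : p x = false := by simpa using hx
      have hstep : PySem.List.insertBy
          (fun a b => decide ((if p a then (0 : Nat) else 1) < (if p b then (0 : Nat) else 1)))
          x (A ++ B) = A ++ (B ++ [x]) := by
        rw [← List.append_assoc]
        exact PySem.List.insertBy_of_forall_not_before _ _ _ (by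
          intro a _; simp [hx'];
          by_cases h : p a = true <;> simp [h])
      have := ih A (B ++ [x]) hA (by intro b hb; rcases List.mem_append.1 hb with h | h
                                     · exact hB b h
                                     · simp at h; simpa [h] using hx')
      simp only [List.foldl_cons, hstep, this, List.filter_cons, hx']
      simp

theorem sorted_two_valued (p : String → Bool) (xs : List String) :
    PySem.List.sorted xs (fun f => if p f then (0 : Nat) else 1)
      = xs.filter p ++ xs.filter (fun f => !p f) := by
  rw [PySem.List.sorted_eq_foldl_insertBy]
  simpa using foldl_insertBy_two_valued p xs [] [] (by simp) (by simp)

-- A's 'f not in pri' coincides with 'f has no priority prefix' on elements of dq_flags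
theorem rest_eq (dq_flags : List String) (p : String → Bool) :
    dq_flags.filter (fun f => !((dq_flags.filter p).contains f))
      = dq_flags.filter (fun f => !p f) := by
  apply List.filter_congr
  intro f hf
  by_cases h : p f = true
  · simp [List.mem_filter, hf, h]
  · simp only [Bool.not_eq_true] at h
    simp [List.mem_filter, h]

-- ===== VERDICT (by name: the statement is the Claim_ definition above) =====
theorem dq_compact_py_spec : Claim_equal_dq_compact_py := by
  intro dq_flags _
  unfold Spec_dq_compact_py dq_compact_py dq_compact_py_alt
  by_cases hnil : dq_flags = []
  · simp [hnil]
  · simp only [if_neg hnil]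
    set p : String → Bool := fun f => pvPriorityPrefix.any (fun p => PySem.Str.startswith f p) with hp
    have hord : PySem.List.sorted dq_flags (fun f => if p f then (0 : Nat) else 1)
        = dq_flags.filter p ++ dq_flags.filter (fun f => !(dq_flags.filter p).contains f) := by
      rw [sorted_two_valued, rest_eq]
    rw [← hord]
    set ordered := PySem.List.sorted dq_flags (fun f => if p f then (0 : Nat) else 1) with hod
    by_cases hlen : ordered.length ≤ 6
    · have h1 : ((ordered.length : Int) - 6 ≤ 0) := by omega
      have h2 : PySem.List.slice ordered none (some 6) = ordered := by
        have : PySem.List.slice ordered none (some ((6 : Nat) : Int)) = ordered.take 6 :=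
          PySem.List.slice_to_natCast ordered 6
        simpa [List.take_of_length_le hlen] using this
      simp [hlen, h1, h2]
    · have h1 : ¬ ((ordered.length : Int) - 6 ≤ 0) := by omega
      simp [hlen, h1]
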